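-- pv_equiv track=rewrite | github.com/hakloev/it3105-aiprog-project3 | module6/control/gamectrl.py | lines_for_insert
-- ===== SOURCE A (Python) =====
-- UP = 1
--
-- DOWN = 2
--
-- LEFT = 3
--
-- RIGHT = 4
--
-- OFFSETS = {UP: (1, 0),
--            DOWN: (-1, 0),
--            LEFT: (0, 1),
--            RIGHT: (0, -1)}
--
-- def init_tiles(seq, direction):
--     """
--     return a list of indices of tiles whose value will be first passed into the merged function
--     with respect to the direction chosen.
--     """
--     row = len(seq)
--     col = len(seq[0])
--     dir_dict = {
--         UP: [[0, i] for i in range(col)],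
--         DOWN: [[row - 1, i] for i in range(col)],
--         LEFT: [[i, 0] for i in range(row)],
--         RIGHT: [[i, col - 1] for i in range(row)]
--     }
--     return dir_dict[direction]
--
-- def lines_for_insert(seq, direction):
--     """
--     to determine all the lines of values that are to be inserted into the grid
--     """
--     # this is a list of list that contains list of lines
--     lines = []
--     initial = init_tiles(seq, direction)
--     offsets = OFFSETS[direction]
--
--     line_len = 0
--     if direction == UP or direction == DOWN:
--         line_len = len(seq)
--     elif direction == LEFT or direction == RIGHT:
--         line_len = len(seq[0])
--
--     for tile in initial:
--         # this is a list of value of one single individual line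
--         line = []
--         for num in range(line_len):
--             row = tile[0] + num * offsets[0]
--             col = tile[1] + num * offsets[1]
--             line.append(seq[row][col])
--
--         lines.append(line)
--
--     return lines
-- ===== SOURCE B (Python) =====
-- UP = 1
-- DOWN = 2
-- LEFT = 3
-- RIGHT = 4
--
-- def lines_for_insert(seq, direction):
--     """
--     to determine all the lines of values that are to be inserted into the grid
--     """
--     if direction == UP:
--         return [list(c) for c in zip(*seq)]
--     if direction == DOWN:
--         return [list(c)[::-1] for c in zip(*seq)]
--     if direction == LEFT:
--         return [list(r) for r in seq]
--     if direction == RIGHT: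
--         return [r[::-1] for r in seq]
--     raise KeyError(direction)
-- ===== Notes on version B (the rewrite author's own statement) =====
-- stated objective: simpler
-- what changed: Replaces OFFSETS/init_tiles and the multiplicative (row,col) offset arithmetic with a direct branch per direction that builds the lines by transposing (zip(*seq)), reversing, or copying rows.
-- outside the precondition, e.g. on lines_for_insert([[1, 2], [3, 4, 5]], 3): A returns [[1, 2], [3, 4]], B returns [[1, 2], [3, 4, 5]]
import Mathlib
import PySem

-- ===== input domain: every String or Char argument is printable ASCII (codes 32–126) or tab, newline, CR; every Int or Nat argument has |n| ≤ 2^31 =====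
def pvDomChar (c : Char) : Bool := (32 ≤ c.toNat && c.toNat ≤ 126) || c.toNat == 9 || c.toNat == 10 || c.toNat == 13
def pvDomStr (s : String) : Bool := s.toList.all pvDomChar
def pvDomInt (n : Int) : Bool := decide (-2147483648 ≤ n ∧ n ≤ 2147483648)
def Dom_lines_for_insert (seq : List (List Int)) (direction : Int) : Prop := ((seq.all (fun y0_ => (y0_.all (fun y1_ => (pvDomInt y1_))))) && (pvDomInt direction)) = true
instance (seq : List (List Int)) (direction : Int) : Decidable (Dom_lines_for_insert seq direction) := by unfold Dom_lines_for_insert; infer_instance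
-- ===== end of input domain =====

-- B replaces the offset arithmetic with a direct per-direction branch (transpose / reverse / copy); simpler, same cost.

-- ===== PORT A =====
-- OFFSETS = {UP: (1,0), DOWN: (-1,0), LEFT: (0,1), RIGHT: (0,-1)}
def pvOFFSETS : PySem.Dict Int (Int × Int) :=
  ((((PySem.Dict.empty).insert 1 (1, 0)).insert 2 (-1, 0)).insert 3 (0, 1)).insert 4 (0, -1)

def init_tiles (seq : List (List Int)) (direction : Int) : List (List Int) :=
  let row : Int := seq.length
  let col : Int := (PySem.List.pyGetD seq 0 []).length   -- seq[0]; Pre_ excludes the empty grid (IndexError)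
  let dir_dict : PySem.Dict Int (List (List Int)) :=
    ((((PySem.Dict.empty).insert 1 ((PySem.List.pyRange 0 col 1).map (fun i => [0, i]))).insert
        2 ((PySem.List.pyRange 0 col 1).map (fun i => [row - 1, i]))).insert
        3 ((PySem.List.pyRange 0 row 1).map (fun i => [i, 0]))).insert
        4 ((PySem.List.pyRange 0 row 1).map (fun i => [i, col - 1]))
  dir_dict.getD direction []   -- dir_dict[direction]; Pre_ excludes a KeyError

def lines_for_insert (seq : List (List Int)) (direction : Int) : List (List Int) :=
  let initial := init_tiles seq direction
  let offsets := pvOFFSETS.getD direction (0, 0)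
  let line_len : Int :=
    if direction = 1 ∨ direction = 2 then (seq.length : Int)
    else if direction = 3 ∨ direction = 4 then ((PySem.List.pyGetD seq 0 []).length : Int)
    else 0
  initial.map (fun tile =>
    (PySem.List.pyRange 0 line_len 1).map (fun num =>
      let row := PySem.List.pyGetD tile 0 0 + num * offsets.1
      let col := PySem.List.pyGetD tile 1 0 + num * offsets.2
      PySem.List.pyGetD (PySem.List.pyGetD seq row []) col 0))

-- ===== PORT B =====
-- zip(*rows): stops as soon as any row is exhausted (structural recursion on the first row)
def pvZip : List Int → List (List Int) → List (List Int)
  | [], _ => []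
  | x :: xs, rs =>
    if rs.any (fun r => r.isEmpty) then []
    else (x :: rs.map (fun r => r.headD 0)) :: pvZip xs (rs.map List.tail)

def pvTranspose (seq : List (List Int)) : List (List Int) :=
  match seq with
  | [] => []
  | r :: rs => pvZip r rs

def lines_for_insert_alt (seq : List (List Int)) (direction : Int) : List (List Int) :=
  if direction = 1 then pvTranspose seq
  else if direction = 2 then (pvTranspose seq).map List.reverse
  else if direction = 3 then seq
  else if direction = 4 then seq.map List.reverse
  else []   -- Python B raises KeyError here; outside Pre_

-- ===== PRECONDITION & SPEC =====
-- Pre_ excludes: the empty grid and directions outside {1,2,3,4} (A raises IndexError/KeyError there),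
-- and ragged grids, on which A's silent truncation of every line to len(seq[0]) is an accident of its
-- offset arithmetic and B keeps the whole rows (grids of this game are rectangular).
def Pre_lines_for_insert (seq : List (List Int)) (direction : Int) : Prop :=
  seq ≠ [] ∧ (direction = 1 ∨ direction = 2 ∨ direction = 3 ∨ direction = 4) ∧
  (seq.all (fun r => r.length = (seq.headD []).length) = true)
instance (seq : List (List Int)) (direction : Int) : Decidable (Pre_lines_for_insert seq direction) := by
  unfold Pre_lines_for_insert; infer_instance

def pvWitness_lines_for_insert : List (List Int) × Int := ([[1, 2], [3, 4]], 1)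

def Spec_lines_for_insert (seq : List (List Int)) (direction : Int) (out : List (List Int)) : Prop := out = lines_for_insert_alt seq direction
instance (seq : List (List Int)) (direction : Int) (out : List (List Int)) : Decidable (Spec_lines_for_insert seq direction out) := by unfold Spec_lines_for_insert; infer_instance

-- ===== CLAIM (what is proved, stated in full; the proofs are below) =====
def Claim_equal_lines_for_insert : Prop := ∀ (seq : List (List Int)) (direction : Int), Dom_lines_for_insert seq direction → Pre_lines_for_insert seq direction → Spec_lines_for_insert seq direction (lines_for_insert seq direction)


-- ===== LEMMAS AND PROOFS =====

-- (range len).map (getD . d) rebuilds the list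
theorem pv_range_map_getD {α : Type} (xs : List α) (d : α) :
    (List.range xs.length).map (fun n => xs.getD n d) = xs := by
  apply List.ext_getElem
  · simp
  · intro n h1 h2
    simp [List.getD_eq_getElem?_getD, h2]

-- reversing a range-map reverses the index
theorem pv_reverse_range_map {α : Type} (n : ℕ) (f : ℕ → α) :
    ((List.range n).map f).reverse = (List.range n).map (fun k => f (n - 1 - k)) := by
  apply List.ext_getElem
  · simp
  · intro k h1 h2
    simp at h1
    simp [List.getElem_reverse]

-- literal lookups in A's two dicts
theorem pv_off1 : pvOFFSETS.getD 1 (0, 0) = (1, 0) := by rfl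
theorem pv_off2 : pvOFFSETS.getD 2 (0, 0) = (-1, 0) := by rfl
theorem pv_off3 : pvOFFSETS.getD 3 (0, 0) = (0, 1) := by rfl
theorem pv_off4 : pvOFFSETS.getD 4 (0, 0) = (0, -1) := by rfl

theorem pv_init1 (seq : List (List Int)) :
    init_tiles seq 1 =
      (PySem.List.pyRange 0 ((PySem.List.pyGetD seq 0 []).length : Int) 1).map (fun i => [0, i]) := by
  simp only [init_tiles, PySem.Dict.getD_insert, PySem.Dict.getD_empty]
  norm_num

theorem pv_init2 (seq : List (List Int)) :
    init_tiles seq 2 =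
      (PySem.List.pyRange 0 ((PySem.List.pyGetD seq 0 []).length : Int) 1).map
        (fun i => [(seq.length : Int) - 1, i]) := by
  simp only [init_tiles, PySem.Dict.getD_insert, PySem.Dict.getD_empty]
  norm_num

theorem pv_init3 (seq : List (List Int)) :
    init_tiles seq 3 =
      (PySem.List.pyRange 0 (seq.length : Int) 1).map (fun i => [i, 0]) := by
  simp only [init_tiles, PySem.Dict.getD_insert, PySem.Dict.getD_empty]
  norm_num

theorem pv_init4 (seq : List (List Int)) :
    init_tiles seq 4 =
      (PySem.List.pyRange 0 (seq.length : Int) 1).map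
        (fun i => [i, ((PySem.List.pyGetD seq 0 []).length : Int) - 1]) := by
  simp only [init_tiles, PySem.Dict.getD_insert, PySem.Dict.getD_empty]
  norm_num

-- zip(*.) on a rectangular grid is the index-wise transpose
theorem pv_pvZip_rect (r0 : List Int) (rs : List (List Int))
    (h : ∀ r ∈ rs, r.length = r0.length) :
    pvZip r0 rs =
      (List.range r0.length).map (fun j => (r0 :: rs).map (fun r => r.getD j 0)) := by
  induction r0 generalizing rs with
  | nil => simp [pvZip]
  | cons x xs ih =>
    have hne : rs.any (fun r => r.isEmpty) = false := by
      simp only [List.any_eq_false]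
      intro r hr
      have hl := h r hr
      cases r with
      | nil => simp at hl
      | cons a t => simp
    rw [pvZip, hne]
    simp only [Bool.false_eq_true, if_false]
    have htails : ∀ r ∈ rs.map List.tail, r.length = xs.length := by
      intro r hr
      obtain ⟨r', hr', rfl⟩ := List.mem_map.mp hr
      have hl := h r' hr'
      cases r' with
      | nil => simp at hl
      | cons a t => simpa using hl
    rw [ih _ htails]
    simp only [List.length_cons, List.range_succ_eq_map, List.map_cons, List.map_map]
    congr 1
    · simp only [List.getD_cons_zero]
      congr 1
      apply List.map_congr_left
      intro r hr
      have hl := h r hr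
      cases r with
      | nil => simp at hl
      | cons a t => simp
    · apply List.map_congr_left
      intro k _
      simp only [Function.comp, List.getD_cons_succ]
      congr 1
      apply List.map_congr_left
      intro r hr
      have hl := h r hr
      cases r with
      | nil => simp at hl
      | cons a t => simp

-- a row of a rectangular nonempty grid has the length of the first row
theorem pv_rect_len (seq : List (List Int)) (r : List Int)
    (hrect : seq.all (fun r => r.length = (seq.headD []).length) = true)
    (hr : r ∈ seq) : r.length = (seq.headD []).length := by
  simp only [List.all_eq_true, decide_eq_true_eq] at hrect
  exact hrect r hr

theorem pv_pair0 (a b : Int) : PySem.List.pyGetD [a, b] 0 0 = a := by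
  simp [PySem.List.pyGetD, PySem.List.pyGet?, PySem.List.pyIdx?]

theorem pv_pair1 (a b : Int) : PySem.List.pyGetD [a, b] 1 0 = b := by
  simp [PySem.List.pyGetD, PySem.List.pyGet?, PySem.List.pyIdx?]

-- a map as a map over indices
theorem pv_map_eq_range {α β : Type} (xs : List α) (d : α) (f : α → β) :
    xs.map f = (List.range xs.length).map (fun n => f (xs.getD n d)) := by
  conv_lhs => rw [← pv_range_map_getD xs d]
  rw [List.map_map]
  rfl

theorem lines_spec_aux (seq : List (List Int)) (direction : Int)
    (hne : seq ≠ [])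
    (hd : direction = 1 ∨ direction = 2 ∨ direction = 3 ∨ direction = 4)
    (hrect : seq.all (fun r => r.length = (seq.headD []).length) = true) :
    lines_for_insert seq direction = lines_for_insert_alt seq direction := by
  obtain ⟨r0, rs, rfl⟩ : ∃ r0 rs, seq = r0 :: rs := by
    cases seq with
    | nil => exact absurd rfl hne
    | cons a l => exact ⟨a, l, rfl⟩
  have hlen : ∀ r ∈ rs, r.length = r0.length := by
    intro r hr
    simpa using pv_rect_len (r0 :: rs) r hrect (List.mem_cons_of_mem _ hr)
  have hzip := pv_pvZip_rect r0 rs hlen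
  have hcast : ((rs.length : Int) + 1) = ((rs.length + 1 : Nat) : Int) := by push_cast; ring
  have hli : ∀ i < (r0 :: rs).length, ((r0 :: rs).getD i []).length = r0.length := by
    intro i hi
    have hmem : (r0 :: rs).getD i [] ∈ (r0 :: rs) := by
      rw [List.getD_eq_getElem _ _ hi]
      exact List.getElem_mem hi
    simpa using pv_rect_len (r0 :: rs) _ hrect hmem
  rcases hd with rfl | rfl | rfl | rfl
  · -- UP: columns top-down
    simp only [lines_for_insert, lines_for_insert_alt, pvTranspose, pv_init1, pv_off1]
    norm_num
    rw [hzip, hcast]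
    simp only [PySem.List.pyRange_zero_natCast, List.map_map]
    apply List.map_congr_left
    intro j _
    simp only [Function.comp, pv_pair0, pv_pair1]
    rw [pv_map_eq_range (r0 :: rs) [] (fun r => r.getD j 0)]
    simp only [List.length_cons]
    apply List.map_congr_left
    intro n _
    simp only [Function.comp]
    simp
  · -- DOWN: columns bottom-up
    simp only [lines_for_insert, lines_for_insert_alt, pvTranspose, pv_init2, pv_off2]
    norm_num
    rw [hzip, hcast]
    simp only [PySem.List.pyRange_zero_natCast, List.map_map]
    apply List.map_congr_left
    intro j _
    simp only [Function.comp, pv_pair0, pv_pair1]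
    rw [pv_map_eq_range (r0 :: rs) [] (fun r => r.getD j 0), pv_reverse_range_map]
    simp only [List.length_cons]
    apply List.map_congr_left
    intro n hn
    have hn' : n < rs.length + 1 := List.mem_range.mp hn
    simp only [Function.comp]
    rw [show ((rs.length : Int) + -(n : Int)) = ((rs.length - n : Nat) : Int) by omega]
    simp
  · -- LEFT: the rows themselves
    simp only [lines_for_insert, lines_for_insert_alt, pv_init3, pv_off3]
    norm_num
    rw [hcast]
    simp only [PySem.List.pyRange_zero_natCast, List.map_map]
    conv_rhs => rw [← pv_range_map_getD (r0 :: rs) []]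
    simp only [List.length_cons]
    apply List.map_congr_left
    intro i hi
    have hi' : i < rs.length + 1 := List.mem_range.mp hi
    simp only [Function.comp, pv_pair0, pv_pair1]
    conv_rhs => rw [← pv_range_map_getD ((r0 :: rs).getD i []) 0]
    rw [hli i (by simpa using hi')]
    apply List.map_congr_left
    intro n _
    simp only [Function.comp]
    simp
  · -- RIGHT: rows reversed
    simp only [lines_for_insert, lines_for_insert_alt, pv_init4, pv_off4]
    norm_num
    rw [hcast]
    conv_rhs => rw [← List.map_cons]
    rw [pv_map_eq_range (r0 :: rs) [] List.reverse]
    simp only [List.length_cons, PySem.List.pyRange_zero_natCast, List.map_map]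
    apply List.map_congr_left
    intro i hi
    have hi' : i < rs.length + 1 := List.mem_range.mp hi
    simp only [Function.comp, pv_pair0, pv_pair1]
    conv_rhs => rw [← pv_range_map_getD ((r0 :: rs).getD i []) 0, pv_reverse_range_map]
    rw [hli i (by simpa using hi')]
    apply List.map_congr_left
    intro n hn
    have hn' : n < r0.length := List.mem_range.mp hn
    simp only [Function.comp]
    rw [show ((r0.length : Int) - 1 + -(n : Int)) = ((r0.length - 1 - n : Nat) : Int) by omega]
    simp

-- ===== VERDICT (by name: the statement is the Claim_ definition above) =====
theorem lines_for_insert_spec : Claim_equal_lines_for_insert := by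
  intro seq direction _ hpre
  obtain ⟨hne, hd, hrect⟩ := hpre
  exact lines_spec_aux seq direction hne hd hrect
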